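-- pv_equiv track=rewrite | github.com/mocatfrio/thesis-code | sc/kmpp/customer_thread.py | check_dynamic_domination
-- ===== SOURCE A (Python) =====
-- def check_dynamic_domination(val_a, val_b):
--   equal = 0
--   dominate = 0
--   dominated = 0
--   for col in range(0, len(val_a)):
--     if val_a[col] <= val_b[col]:
--       if val_a[col] < val_b[col]:
--         dominate += 1
--       equal += 1
--     else:
--       dominated += 1
--   if equal == len(val_a):
--     if dominate >= 1:
--       if dominated < 1:
--         return 1
--       else:
--         return 0
--   else:
--     if dominate < 1:
--       return 2
--     else:
--       return 0
-- ===== SOURCE B (Python) =====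
-- def check_dynamic_domination(val_a, val_b):
--     a_better = any(val_a[i] < val_b[i] for i in range(len(val_a)))
--     b_better = any(val_a[i] > val_b[i] for i in range(len(val_a)))
--     if a_better and not b_better:
--         return 1
--     if b_better and not a_better:
--         return 2
--     if a_better and b_better:
--         return 0
--     return None
-- ===== Notes on version B (the rewrite author's own statement) =====
-- stated objective: simpler
-- what changed: Replaces the three integer counters and nested post-loop branching with two boolean existence flags (any a_i < b_i, any a_i > b_i) and a flat if-chain.
import Mathlib
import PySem

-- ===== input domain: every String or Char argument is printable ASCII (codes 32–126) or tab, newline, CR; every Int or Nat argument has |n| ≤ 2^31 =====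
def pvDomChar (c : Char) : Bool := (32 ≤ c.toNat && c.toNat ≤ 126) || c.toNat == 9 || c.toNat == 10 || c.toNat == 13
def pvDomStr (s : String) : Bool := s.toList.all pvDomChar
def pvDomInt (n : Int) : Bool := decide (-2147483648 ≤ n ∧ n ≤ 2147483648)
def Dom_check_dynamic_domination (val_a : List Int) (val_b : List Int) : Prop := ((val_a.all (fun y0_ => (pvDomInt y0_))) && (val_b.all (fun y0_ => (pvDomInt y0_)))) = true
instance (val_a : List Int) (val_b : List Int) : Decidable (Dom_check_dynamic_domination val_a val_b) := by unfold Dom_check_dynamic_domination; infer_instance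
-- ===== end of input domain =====

-- B replaces A's three counters and nested branching by two existence flags and a flat if-chain (simpler; same cost).

-- ===== PORT A =====
-- the indexing pyGetD is exact under Pre_ (every index in range); outside Pre_ Python raises IndexError
def check_dynamic_domination (val_a : List Int) (val_b : List Int) : Option Int :=
  let s := (PySem.List.pyRange 0 (val_a.length : Int) 1).foldl
    (fun (s : Int × Int × Int) col =>
      if PySem.List.pyGetD val_a col 0 ≤ PySem.List.pyGetD val_b col 0 then
        if PySem.List.pyGetD val_a col 0 < PySem.List.pyGetD val_b col 0 then
          (s.1 + 1, s.2.1 + 1, s.2.2)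
        else (s.1 + 1, s.2.1, s.2.2)
      else (s.1, s.2.1, s.2.2 + 1))
    (0, 0, 0)
  if s.1 = (val_a.length : Int) then
    if s.2.1 ≥ 1 then
      if s.2.2 < 1 then some 1 else some 0
    else none
  else
    if s.2.1 < 1 then some 2 else some 0

-- ===== PORT B =====
def check_dynamic_domination_alt (val_a : List Int) (val_b : List Int) : Option Int :=
  let a_better := (PySem.List.pyRange 0 (val_a.length : Int) 1).any
      (fun i => PySem.List.pyGetD val_a i 0 < PySem.List.pyGetD val_b i 0)
  let b_better := (PySem.List.pyRange 0 (val_a.length : Int) 1).any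
      (fun i => PySem.List.pyGetD val_a i 0 > PySem.List.pyGetD val_b i 0)
  if a_better && !b_better then some 1
  else if b_better && !a_better then some 2
  else if a_better && b_better then some 0
  else none

-- ===== PRECONDITION & SPEC =====
-- Pre_ excludes exactly the inputs where Python A raises IndexError (val_b shorter than val_a)
def Pre_check_dynamic_domination (val_a : List Int) (val_b : List Int) : Prop := val_a.length ≤ val_b.length
instance (val_a : List Int) (val_b : List Int) : Decidable (Pre_check_dynamic_domination val_a val_b) := by unfold Pre_check_dynamic_domination; infer_instance
def pvWitness_check_dynamic_domination : List Int × List Int := ([1, 3], [2, 3])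
def Spec_check_dynamic_domination (val_a : List Int) (val_b : List Int) (out : Option Int) : Prop := out = check_dynamic_domination_alt val_a val_b
instance (val_a : List Int) (val_b : List Int) (out : Option Int) : Decidable (Spec_check_dynamic_domination val_a val_b out) := by unfold Spec_check_dynamic_domination; infer_instance

-- ===== CLAIM (what is proved, stated in full; the proofs are below) =====
def Claim_equal_check_dynamic_domination : Prop := ∀ (val_a : List Int) (val_b : List Int), Dom_check_dynamic_domination val_a val_b → Pre_check_dynamic_domination val_a val_b → Spec_check_dynamic_domination val_a val_b (check_dynamic_domination val_a val_b)

-- ===== LEMMAS AND PROOFS =====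

-- A's loop computes the three counts (≤, <, >) over the index list
theorem foldA_counts (va vb L : List Int) (e d m : Int) :
    L.foldl
      (fun (s : Int × Int × Int) col =>
        if PySem.List.pyGetD va col 0 ≤ PySem.List.pyGetD vb col 0 then
          if PySem.List.pyGetD va col 0 < PySem.List.pyGetD vb col 0 then
            (s.1 + 1, s.2.1 + 1, s.2.2)
          else (s.1 + 1, s.2.1, s.2.2)
        else (s.1, s.2.1, s.2.2 + 1))
      (e, d, m)
    = (e + L.countP (fun i => decide (PySem.List.pyGetD va i 0 ≤ PySem.List.pyGetD vb i 0)),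
       d + L.countP (fun i => decide (PySem.List.pyGetD va i 0 < PySem.List.pyGetD vb i 0)),
       m + L.countP (fun i => decide (PySem.List.pyGetD vb i 0 < PySem.List.pyGetD va i 0))) := by
  induction L generalizing e d m with
  | nil => simp
  | cons x xs ih =>
    simp only [List.foldl_cons, List.countP_cons]
    by_cases hle : PySem.List.pyGetD va x 0 ≤ PySem.List.pyGetD vb x 0
    · by_cases hlt : PySem.List.pyGetD va x 0 < PySem.List.pyGetD vb x 0
      · simp [hle, hlt, ih, not_lt.mpr hle]
        omega
      · simp [hle, hlt, ih, not_lt.mpr hle]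
        omega
    · have hgt : PySem.List.pyGetD vb x 0 < PySem.List.pyGetD va x 0 := not_le.mp hle
      simp [hle, hgt, ih]
      omega

-- list.any of a decidable predicate is the decide of the existence statement
theorem any_decide_mem (p : Int → Prop) [DecidablePred p] (L : List Int) :
    (L.any fun i => decide (p i)) = decide (∃ i ∈ L, p i) := by
  by_cases h : ∃ i ∈ L, p i <;> simp [List.any_eq_true, h]
  exact fun x hx hp => h ⟨x, hx, hp⟩

-- ===== VERDICT (by name: the statement is the Claim_ definition above) =====
theorem check_dynamic_domination_spec : Claim_equal_check_dynamic_domination := by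
  intro va vb _ _
  unfold Spec_check_dynamic_domination check_dynamic_domination check_dynamic_domination_alt
  simp only [foldA_counts, zero_add]
  set L := PySem.List.pyRange 0 (va.length : Int) 1 with hL
  rw [any_decide_mem (fun i => PySem.List.pyGetD va i 0 < PySem.List.pyGetD vb i 0) L,
      any_decide_mem (fun i => PySem.List.pyGetD vb i 0 < PySem.List.pyGetD va i 0) L]
  set cLE := L.countP (fun i => decide (PySem.List.pyGetD va i 0 ≤ PySem.List.pyGetD vb i 0)) with hcLE
  set cLT := L.countP (fun i => decide (PySem.List.pyGetD va i 0 < PySem.List.pyGetD vb i 0)) with hcLT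
  set cGT := L.countP (fun i => decide (PySem.List.pyGetD vb i 0 < PySem.List.pyGetD va i 0)) with hcGT
  have hlen : L.length = va.length := by
    simp [hL, PySem.List.length_pyRange_one]
  have hLEle : cLE ≤ L.length := by rw [hcLE]; exact List.countP_le_length
  have hLE : (cLE = L.length) ↔ ¬ ∃ i ∈ L, PySem.List.pyGetD vb i 0 < PySem.List.pyGetD va i 0 := by
    rw [hcLE, List.countP_eq_length]
    constructor
    · intro h ⟨i, hi, hlt⟩
      exact absurd hlt (not_lt.mpr (by simpa using h i hi))
    · intro h i hi
      simpa using not_lt.mp (fun hlt => h ⟨i, hi, hlt⟩)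
  have hLT : (0 < cLT) ↔ ∃ i ∈ L, PySem.List.pyGetD va i 0 < PySem.List.pyGetD vb i 0 := by
    rw [hcLT, List.countP_pos_iff]
    simp
  have hGT : (0 < cGT) ↔ ∃ i ∈ L, PySem.List.pyGetD vb i 0 < PySem.List.pyGetD va i 0 := by
    rw [hcGT, List.countP_pos_iff]
    simp
  by_cases ha : ∃ i ∈ L, PySem.List.pyGetD va i 0 < PySem.List.pyGetD vb i 0 <;>
    by_cases hb : ∃ i ∈ L, PySem.List.pyGetD vb i 0 < PySem.List.pyGetD va i 0
  · have c1 : 0 < cLT := hLT.mpr ha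
    have c2 : 0 < cGT := hGT.mpr hb
    have c3 : cLE ≠ L.length := fun h => (hLE.mp h) hb
    simp only [ha, hb, decide_true, Bool.not_true, Bool.and_false, Bool.and_true]
    split_ifs <;> first | rfl | (exfalso; omega)
  · have c1 : 0 < cLT := hLT.mpr ha
    have c2 : cGT = 0 := by
      by_contra hne
      exact hb (hGT.mp (Nat.pos_of_ne_zero hne))
    have c3 : cLE = L.length := hLE.mpr hb
    simp only [ha, hb, decide_true, decide_false, Bool.not_false, Bool.and_true, Bool.false_and, Bool.and_false]
    split_ifs <;> first | rfl | (exfalso; omega)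
  · have c1 : cLT = 0 := by
      by_contra hne
      exact ha (hLT.mp (Nat.pos_of_ne_zero hne))
    have c2 : 0 < cGT := hGT.mpr hb
    have c3 : cLE ≠ L.length := fun h => (hLE.mp h) hb
    simp only [ha, hb, decide_true, decide_false, Bool.not_false, Bool.not_true, Bool.false_and, Bool.and_true, Bool.and_false]
    split_ifs <;> first | rfl | (exfalso; omega)
  · have c1 : cLT = 0 := by
      by_contra hne
      exact ha (hLT.mp (Nat.pos_of_ne_zero hne))
    have c2 : cGT = 0 := by
      by_contra hne
      exact hb (hGT.mp (Nat.pos_of_ne_zero hne))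
    have c3 : cLE = L.length := hLE.mpr hb
    simp only [ha, hb, decide_false, Bool.false_and, Bool.and_false]
    split_ifs <;> first | rfl | (exfalso; omega)
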